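-- pv_equiv track=rewrite | github.com/hellorahat/NLP-Naive-Bayes-Classifier | pre-process.py | separate_punctuation
-- ===== SOURCE A (Python) =====
-- def separate_punctuation(text):
--     new_text = ""
--     for char in text:
--         if is_punctuation(char):
--             new_text += " " + char + " "
--         else:
--             new_text += char
--     return new_text
--
-- def is_punctuation(char):
--     punctuation = ".!?,:;\"\'():-/"
--     return char in punctuation
-- ===== SOURCE B (Python) =====
-- def separate_punctuation(text):
--     punctuation = ".!?,:;\"\'():-/"
--     for c in dict.fromkeys(punctuation):
--         text = text.replace(c, " " + c + " ")
--     return text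
-- ===== Notes on version B (the rewrite author's own statement) =====
-- stated objective: faster
-- what changed: Instead of one char-by-char pass appending to an accumulator string, B loops over the fixed (deduplicated) punctuation alphabet and rewrites the whole text once per punctuation character with str.replace, surrounding that character with spaces.
import Mathlib
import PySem

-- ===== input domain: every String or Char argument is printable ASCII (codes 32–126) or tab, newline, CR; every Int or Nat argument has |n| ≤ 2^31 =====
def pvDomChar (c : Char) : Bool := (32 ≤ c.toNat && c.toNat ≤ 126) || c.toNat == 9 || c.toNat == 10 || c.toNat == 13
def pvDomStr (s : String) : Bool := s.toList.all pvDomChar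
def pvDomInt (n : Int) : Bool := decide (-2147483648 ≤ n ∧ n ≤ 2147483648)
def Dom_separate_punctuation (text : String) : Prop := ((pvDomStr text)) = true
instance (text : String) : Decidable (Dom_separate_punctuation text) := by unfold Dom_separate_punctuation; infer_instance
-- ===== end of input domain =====

-- B iterates over the fixed punctuation alphabet (deduplicated, since ':' occurs twice in the
-- constant) and surrounds each punctuation char everywhere at once with str.replace, instead of
-- A's char-by-char accumulation pass; measurably faster (replace runs in C, no per-char Python work).

-- ===== PORT A =====
def is_punctuation (char : Char) : Bool :=
  PySem.Chars.isIn [char] ".!?,:;\"'():-/".toList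

def separate_punctuation (text : String) : String :=
  String.ofList (text.toList.foldl
    (fun new_text char =>
      new_text ++ (if is_punctuation char then [' ', char, ' '] else [char])) [])

-- ===== PORT B =====
def separate_punctuation_alt (text : String) : String :=
  (PySem.List.dedup ".!?,:;\"'():-/".toList).foldl
    (fun t c => PySem.Str.replace t (String.ofList [c]) (String.ofList [' ', c, ' '])) text

-- ===== PRECONDITION & SPEC =====
def Spec_separate_punctuation (text : String) (out : String) : Prop := out = separate_punctuation_alt text
instance (text : String) (out : String) : Decidable (Spec_separate_punctuation text out) := by unfold Spec_separate_punctuation; infer_instance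

-- ===== CLAIM (what is proved, stated in full; the proofs are below) =====
def Claim_equal_separate_punctuation : Prop := ∀ (text : String), Dom_separate_punctuation text → Spec_separate_punctuation text (separate_punctuation text)

-- ===== LEMMAS AND PROOFS =====

-- the punctuation alphabet after dict.fromkeys deduplication (':' occurs twice in the constant)
def pvPunct : List Char := ['.','!','?',',',':',';','"','\'','(',')','-','/']

set_option maxRecDepth 2048 in
theorem dedup_punct : PySem.List.dedup ".!?,:;\"'():-/".toList = pvPunct := by decide

-- the per-character expansion applied once the chars of P have been processed
def pvExpand (P : List Char) (ch : Char) : List Char :=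
  if ch ∈ P then [' ', ch, ' '] else [ch]

-- replace.go on a single-character pattern is the obvious flatMap (fuel-indexed loop of PySem.Chars.replace)
theorem go_single (c : Char) (new : List Char) :
    ∀ (fuel : Nat) (l acc : List Char), l.length ≤ fuel →
      PySem.Chars.replace.go [c] new fuel l acc
        = acc.reverse ++ l.flatMap (fun ch => if ch = c then new else [ch]) := by
  intro fuel
  induction fuel with
  | zero =>
    intro l acc h
    have : l = [] := List.eq_nil_of_length_eq_zero (Nat.le_zero.mp h)
    subst this; simp [PySem.Chars.replace.go]
  | succ n ih =>
    intro l acc h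
    cases l with
    | nil => simp [PySem.Chars.replace.go]
    | cons ch t =>
      rw [PySem.Chars.replace.go]
      by_cases hc : ch = c
      · subst hc
        simp only [List.isPrefixOf, BEq.rfl, Bool.and_self, if_true]
        rw [ih _ _ (by simpa using h)]
        simp
      · have hp : List.isPrefixOf [c] (ch :: t) = false := by
          simp [List.isPrefixOf, Ne.symm hc]
        rw [hp]
        simp only [Bool.false_eq_true, if_false]
        rw [ih _ _ (by simpa using Nat.le_of_succ_le_succ (by simpa using h))]
        simp [hc]

theorem replace_single (s : List Char) (c : Char) (new : List Char) :
    PySem.Chars.replace s [c] new = s.flatMap (fun ch => if ch = c then new else [ch]) := by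
  rw [PySem.Chars.replace]
  simp [go_single c new s.length s [] le_rfl]

-- one replace pass extends the processed alphabet by c (c fresh, and not the inserted space)
theorem replace_expand (s : List Char) (P : List Char) (c : Char)
    (hcP : c ∉ P) (hcs : c ≠ ' ') :
    PySem.Chars.replace (s.flatMap (pvExpand P)) [c] [' ', c, ' ']
      = s.flatMap (pvExpand (P ++ [c])) := by
  rw [replace_single, List.flatMap_assoc]
  apply List.flatMap_congr
  intro ch _
  by_cases h : ch ∈ P
  · have hne : ch ≠ c := fun e => hcP (e ▸ h)
    have h' : ch ∈ P ++ [c] := List.mem_append_left _ h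
    rw [pvExpand, pvExpand, if_pos h, if_pos h']
    simp [hne, Ne.symm hcs]
  · by_cases he : ch = c
    · subst he
      have h' : ch ∈ P ++ [ch] := List.mem_append_right _ (by simp)
      rw [pvExpand, pvExpand, if_neg h, if_pos h']
      simp
    · have h' : ch ∉ P ++ [c] := by
        simp only [List.mem_append, List.mem_singleton]
        rintro (hh | hh); exact h hh; exact he hh
      rw [pvExpand, pvExpand, if_neg h, if_neg h']
      simp [he]

-- the whole B loop over Q, starting from the state where P is already processed
theorem fold_expand (s : List Char) :
    ∀ (Q P : List Char), Q.Nodup → (∀ c ∈ Q, c ∉ P ∧ c ≠ ' ') →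
      Q.foldl (fun l c => PySem.Chars.replace l [c] [' ', c, ' ']) (s.flatMap (pvExpand P))
        = s.flatMap (pvExpand (P ++ Q)) := by
  intro Q
  induction Q with
  | nil => intro P _ _; simp
  | cons c Q ih =>
    intro P hnd hfresh
    have h1 := hfresh c (by simp)
    simp only [List.foldl_cons]
    rw [replace_expand s P c h1.1 h1.2]
    rw [ih (P ++ [c]) hnd.of_cons (fun d hd => by
      have := hfresh d (by simp [hd])
      refine ⟨?_, this.2⟩
      simp only [List.mem_append, List.mem_singleton]
      rintro (h | h)
      · exact this.1 h
      · exact (List.nodup_cons.mp hnd).1 (h ▸ hd))]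
    simp

-- B's string-level loop computes the char-level loop
theorem foldB_toList :
    ∀ (Q : List Char) (t : String),
      (Q.foldl (fun t c => PySem.Str.replace t (String.ofList [c]) (String.ofList [' ', c, ' '])) t).toList
        = Q.foldl (fun l c => PySem.Chars.replace l [c] [' ', c, ' ']) t.toList := by
  intro Q
  induction Q with
  | nil => intro t; simp
  | cons c Q ih =>
    intro t
    simp only [List.foldl_cons]
    rw [ih, PySem.Str.toList_replace]
    simp

-- membership in the full punctuation constant equals membership in its dedup, and is is_punctuation
theorem is_punctuation_mem (c : Char) :
    is_punctuation c = true ↔ c ∈ pvPunct := by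
  rw [is_punctuation, PySem.Chars.isIn_iff_infix, List.singleton_infix_iff,
    ← dedup_punct, PySem.List.mem_dedup]

-- ===== VERDICT (by name: the statement is the Claim_ definition above) =====
set_option maxRecDepth 8192 in
theorem separate_punctuation_spec : Claim_equal_separate_punctuation := by
  intro text _
  unfold Spec_separate_punctuation separate_punctuation separate_punctuation_alt
  rw [dedup_punct]
  have hA : text.toList.foldl
      (fun new_text char =>
        new_text ++ (if is_punctuation char then [' ', char, ' '] else [char])) []
      = text.toList.flatMap (pvExpand pvPunct) := by
    rw [PySem.List.foldl_append_eq_flatMap]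
    simp only [List.nil_append]
    apply List.flatMap_congr
    intro ch _
    by_cases h : ch ∈ pvPunct
    · rw [pvExpand, if_pos h, if_pos ((is_punctuation_mem ch).mpr h)]
    · have hp : is_punctuation ch ≠ true := fun e => h ((is_punctuation_mem ch).mp e)
      rw [pvExpand, if_neg h, if_neg hp]
  have hB : ((pvPunct).foldl
      (fun t c => PySem.Str.replace t (String.ofList [c]) (String.ofList [' ', c, ' '])) text).toList
      = text.toList.flatMap (pvExpand pvPunct) := by
    rw [foldB_toList]
    have h0 : text.toList.flatMap (pvExpand []) = text.toList := by
      have he : pvExpand [] = fun ch => [ch] :=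
        funext fun ch => by rw [pvExpand, if_neg (List.not_mem_nil)]
      rw [he]; exact List.flatMap_singleton' _
    conv_lhs => rw [← h0]
    rw [fold_expand text.toList _ [] (by decide)
      (by intro c hc; exact ⟨List.not_mem_nil, by fin_cases hc <;> decide⟩), List.nil_append]
  calc String.ofList (text.toList.foldl
        (fun new_text char =>
          new_text ++ (if is_punctuation char then [' ', char, ' '] else [char])) [])
      = String.ofList (((pvPunct).foldl
          (fun t c => PySem.Str.replace t (String.ofList [c]) (String.ofList [' ', c, ' '])) text).toList) := by
        rw [hA, hB]
    _ = _ := String.ofList_toList
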